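-- pv_equiv track=rewrite | github.com/nejoinc/EjercicioValidadorClave | validadorclave/modelo/validador.py | contiene_calisto
-- ===== SOURCE A (Python) =====
-- def contiene_calisto(clave: str) -> bool:
--     palabra = "calisto"
--     clave_lower = clave.lower()
--
--     i = 0
--     while i <= len(clave_lower) - len(palabra):
--         if clave_lower[i:i + len(palabra)] == palabra:
--             subcadena = clave[i:i + len(palabra)]
--
--             mayusculas_count = sum(1 for c in subcadena if c.isupper())
--
--             if mayusculas_count >= 2 and mayusculas_count < len(palabra):
--                 return True
--         i += 1
--
--     return False
-- ===== SOURCE B (Python) =====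
-- def contiene_calisto(clave: str) -> bool:
--     # Single pass: a pattern-matching automaton over the characters (failure
--     # links of "calisto" collapse to: restart at 1 on 'c', else 0) combined
--     # with a rolling count of uppercase letters in the last 7 characters.
--     palabra = "calisto"
--     estado = 0          # chars of the pattern matched so far
--     ups = 0             # uppercase letters among the last min(i, 7) chars
--     for i, ch in enumerate(clave):
--         ups += ch.isupper()
--         if i >= 7:
--             ups -= clave[i - 7].isupper()
--         c = ch.lower()
--         if c == palabra[estado]:
--             estado += 1
--         elif c == 'c':
--             estado = 1
--         else:
--             estado = 0
--         if estado == 7: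
--             if 2 <= ups < 7:
--                 return True
--             estado = 0  # "calisto" has no border, so restart from scratch
--     return False
-- ===== Notes on version B (the rewrite author's own statement) =====
-- stated objective: alternative
-- what changed: Replaces A's sliding-window scan (lowercase the whole string, compare a fresh 7-char slice at every index, recount uppercase from scratch on each hit) with a single left-to-right pass running a pattern-matching automaton for the search word (whose failure links collapse to: restart at 1 on its first letter, else 0, since it has no border) together with a rolling count of uppercase letters in the last 7 characters.
import Mathlib
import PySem

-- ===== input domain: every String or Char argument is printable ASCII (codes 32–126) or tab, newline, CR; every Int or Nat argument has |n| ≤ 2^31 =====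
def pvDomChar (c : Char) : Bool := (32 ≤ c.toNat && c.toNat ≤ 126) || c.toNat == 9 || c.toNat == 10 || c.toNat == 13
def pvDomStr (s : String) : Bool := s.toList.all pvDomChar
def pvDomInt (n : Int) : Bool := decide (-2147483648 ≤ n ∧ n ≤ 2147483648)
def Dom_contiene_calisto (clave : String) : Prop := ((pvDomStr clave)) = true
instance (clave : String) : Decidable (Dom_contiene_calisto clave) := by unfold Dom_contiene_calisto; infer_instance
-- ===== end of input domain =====

-- B replaces A's position-by-position window scan (lowercase, compare a 7-char
-- slice at every index, recount uppercase from scratch) by a single left-to-right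
-- pass: a pattern-matching automaton for "calisto" combined with a rolling count
-- of uppercase letters among the last 7 characters; objective: alternative.

-- ===== PORT A =====
-- A's while loop: i runs 0,1,2,… while i <= len(clave_lower) - len(palabra) ( = 7).
def contieneCalistoLoopA (clave clave_lower : List Char) (i : Nat) : Bool :=
  if h : (i : Int) ≤ (clave_lower.length : Int) - 7 then
    if PySem.List.slice clave_lower (some (i : Int)) (some ((i : Int) + 7)) = "calisto".toList then
      let subcadena := PySem.List.slice clave (some (i : Int)) (some ((i : Int) + 7))
      let mayusculas_count : Int :=
        subcadena.foldl (fun acc c => if PySem.Chars.isupper c then acc + 1 else acc) 0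
      if 2 ≤ mayusculas_count ∧ mayusculas_count < 7 then true
      else contieneCalistoLoopA clave clave_lower (i + 1)
    else contieneCalistoLoopA clave clave_lower (i + 1)
  else false
termination_by clave_lower.length - i
decreasing_by all_goals omega

def contiene_calisto (clave : String) : Bool :=
  contieneCalistoLoopA clave.toList (PySem.Chars.lower clave.toList) 0

-- ===== PORT B =====
-- B's for loop over i = 0,1,…,len-1 with state (estado, ups):
--   estado = chars of "calisto" matched so far, ups = rolling uppercase count of
--   the last min(i,7) characters.  clave.getD (i-7) and "calisto".getD estado are
--   Python's clave[i-7] / palabra[estado], always in range there (i ≥ 7; estado ≤ 6).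
def contieneCalistoLoopB (clave : List Char) (i estado : Nat) (ups : Int) : Bool :=
  if h : i < clave.length then
    let ch := clave[i]
    let ups2 := if 7 ≤ i then
        ups + (if PySem.Chars.isupper ch then 1 else 0)
            - (if PySem.Chars.isupper (clave.getD (i - 7) ' ') then 1 else 0)
      else ups + (if PySem.Chars.isupper ch then 1 else 0)
    let c := PySem.Chars.lowerChar ch
    let estado2 := if c = "calisto".toList.getD estado ' ' then estado + 1
      else if c = 'c' then 1 else 0
    if estado2 = 7 then
      if 2 ≤ ups2 ∧ ups2 < 7 then true
      else contieneCalistoLoopB clave (i + 1) 0 ups2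
    else contieneCalistoLoopB clave (i + 1) estado2 ups2
  else false
termination_by clave.length - i
decreasing_by all_goals omega

def contiene_calisto_alt (clave : String) : Bool :=
  contieneCalistoLoopB clave.toList 0 0 0

-- ===== PRECONDITION & SPEC =====
def Spec_contiene_calisto (clave : String) (out : Bool) : Prop := out = contiene_calisto_alt clave
instance (clave : String) (out : Bool) : Decidable (Spec_contiene_calisto clave out) := by unfold Spec_contiene_calisto; infer_instance

-- ===== CLAIM (what is proved, stated in full; the proofs are below) =====
def Claim_equal_contiene_calisto : Prop := ∀ (clave : String), Dom_contiene_calisto clave → Spec_contiene_calisto clave (contiene_calisto clave)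

-- ===== LEMMAS AND PROOFS =====

-- the uppercase count of clave[j:j+7] (as A computes it)
def pvUps (clave : List Char) (j : Nat) : Int :=
  (PySem.List.slice clave (some (j : Int)) (some ((j : Int) + 7))).foldl
    (fun acc c => if PySem.Chars.isupper c then acc + 1 else acc) 0

-- the same fold over an arbitrary char list
def pvCnt (l : List Char) : Int :=
  l.foldl (fun acc c => if PySem.Chars.isupper c then acc + 1 else acc) 0

-- "some window at position ≥ i matches and has a qualifying uppercase count"
def pvOkFrom (clave cl : List Char) (i : Nat) : Prop :=
  ∃ j, i ≤ j ∧ "calisto".toList <+: cl.drop j ∧ 2 ≤ pvUps clave j ∧ pvUps clave j < 7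

theorem pvMatch_iff (cl : List Char) (i : Nat) :
    PySem.List.slice cl (some (i : Int)) (some ((i : Int) + 7)) = "calisto".toList ↔
      "calisto".toList <+: cl.drop i := by
  have hs : PySem.List.slice cl (some (i : Int)) (some ((i : Int) + 7)) = (cl.drop i).take 7 := by
    have := PySem.List.slice_natCast_add cl i 7
    simpa using this
  rw [hs, List.prefix_iff_eq_take]
  constructor
  · intro he; simpa using he.symm
  · intro he; simpa using he.symm

theorem pvPrefix_len (cl : List Char) (j : Nat)
    (h : "calisto".toList <+: cl.drop j) : j + 7 ≤ cl.length := by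
  have := h.length_le
  simp at this
  omega

theorem loopA_iff (clave cl : List Char) :
    ∀ (k i : Nat), cl.length ≤ i + k →
      (contieneCalistoLoopA clave cl i = true ↔ pvOkFrom clave cl i) := by
  intro k
  induction k with
  | zero =>
    intro i hk
    rw [contieneCalistoLoopA, dif_neg (by omega)]
    constructor
    · intro hfalse; exact absurd hfalse (by simp)
    · rintro ⟨j, hij, hpre, _⟩
      have := pvPrefix_len cl j hpre
      omega
  | succ k ih =>
    intro i hk
    rw [contieneCalistoLoopA]
    by_cases h : (i : Int) ≤ (cl.length : Int) - 7
    · have h7 : i + 7 ≤ cl.length := by omega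
      rw [dif_pos h]
      by_cases hm : PySem.List.slice cl (some (i : Int)) (some ((i : Int) + 7)) = "calisto".toList
      · rw [if_pos hm]
        show (if 2 ≤ pvUps clave i ∧ pvUps clave i < 7 then true
              else contieneCalistoLoopA clave cl (i + 1)) = true ↔ pvOkFrom clave cl i
        by_cases hq : 2 ≤ pvUps clave i ∧ pvUps clave i < 7
        · rw [if_pos hq]
          exact ⟨fun _ => ⟨i, le_refl _, (pvMatch_iff cl i).mp hm, hq⟩, fun _ => rfl⟩
        · rw [if_neg hq, ih (i + 1) (by omega)]
          constructor
          · rintro ⟨j, hij, hpre, hu⟩; exact ⟨j, by omega, hpre, hu⟩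
          · rintro ⟨j, hij, hpre, hu⟩
            refine ⟨j, ?_, hpre, hu⟩
            rcases Nat.eq_or_lt_of_le hij with he | hl
            · exfalso; subst he; exact hq hu
            · omega
      · rw [if_neg hm]
        show contieneCalistoLoopA clave cl (i + 1) = true ↔ pvOkFrom clave cl i
        rw [ih (i + 1) (by omega)]
        constructor
        · rintro ⟨j, hij, hpre, hu⟩; exact ⟨j, by omega, hpre, hu⟩
        · rintro ⟨j, hij, hpre, hu⟩
          refine ⟨j, ?_, hpre, hu⟩
          rcases Nat.eq_or_lt_of_le hij with he | hl
          · exfalso; subst he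
            exact hm ((pvMatch_iff cl i).mpr hpre)
          · omega
    · rw [dif_neg h]
      constructor
      · intro hfalse; exact absurd hfalse (by simp)
      · rintro ⟨j, hij, hpre, _⟩
        have := pvPrefix_len cl j hpre
        omega

-- ---------- B-side machinery ----------

-- "the last t lowered characters of clave[:i] are the first t of 'calisto'"
def pvM (clave : List Char) (t i : Nat) : Prop :=
  ((PySem.Chars.lower clave).take i).drop (i - t) = "calisto".toList.take t

-- invariant of B's loop entering iteration i with state (s, ups):
-- s is THE MAXIMAL suffix-match length ≤ min(6,i), ups the rolling window count
def pvInv (clave : List Char) (i s : Nat) (ups : Int) : Prop :=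
  s ≤ 6 ∧ s ≤ i ∧ i ≤ clave.length ∧ pvM clave s i ∧
  (∀ t, s < t → t ≤ 6 → t ≤ i → ¬ pvM clave t i) ∧
  ups = pvCnt ((clave.take i).drop (i - min i 7))

theorem pvLower_length (clave : List Char) :
    (PySem.Chars.lower clave).length = clave.length := by
  simp [PySem.Chars.lower]

theorem pvCnt_shift (l : List Char) (a : Int) :
    l.foldl (fun acc c => if PySem.Chars.isupper c then acc + 1 else acc) a = a + pvCnt l := by
  induction l generalizing a with
  | nil => simp [pvCnt]
  | cons x t ih =>
    simp only [pvCnt, List.foldl_cons] at *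
    rw [ih, ih (if PySem.Chars.isupper x then (0 : Int) + 1 else 0)]
    split_ifs <;> ring

theorem pvCnt_append (l : List Char) (c : Char) :
    pvCnt (l ++ [c]) = pvCnt l + (if PySem.Chars.isupper c then 1 else 0) := by
  simp only [pvCnt, List.foldl_append, List.foldl_cons, List.foldl_nil]
  rw [pvCnt_shift]
  split_ifs <;> simp [pvCnt]

theorem pvCnt_cons (c : Char) (l : List Char) :
    pvCnt (c :: l) = (if PySem.Chars.isupper c then 1 else 0) + pvCnt l := by
  simp only [pvCnt, List.foldl_cons]
  rw [pvCnt_shift]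
  split_ifs <;> simp [pvCnt]

theorem pvApp1 (a b : List Char) (x y : Char) :
    a ++ [x] = b ++ [y] ↔ a = b ∧ x = y := by
  constructor
  · intro h
    have h1 : (a ++ [x]).dropLast = (b ++ [y]).dropLast := by rw [h]
    have h2 : (a ++ [x]).getLast? = (b ++ [y]).getLast? := by rw [h]
    simp at h1 h2
    exact ⟨h1, h2⟩
  · rintro ⟨rfl, rfl⟩; rfl

theorem pvM_zero (clave : List Char) (i : Nat) : pvM clave 0 i := by
  simp [pvM]

theorem pvM_succ (clave : List Char) (t i : Nat) (ht1 : 1 ≤ t) (ht7 : t ≤ 7)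
    (hti : t ≤ i + 1) (h : i < clave.length) :
    pvM clave t (i + 1) ↔
      (pvM clave (t - 1) i ∧
        PySem.Chars.lowerChar clave[i] = "calisto".toList.getD (t - 1) ' ') := by
  have hlen : (PySem.Chars.lower clave).length = clave.length := pvLower_length clave
  have hi' : i < (PySem.Chars.lower clave).length := by omega
  have hget : (PySem.Chars.lower clave)[i]'hi' = PySem.Chars.lowerChar clave[i] := by
    simp [PySem.Chars.lower]
  have h1 : (PySem.Chars.lower clave).take (i + 1) =
      (PySem.Chars.lower clave).take i ++ [PySem.Chars.lowerChar clave[i]] := by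
    rw [List.take_add_one, List.getElem?_eq_getElem hi', hget]
    rfl
  have ht' : t - 1 < ("calisto".toList).length := by simp; omega
  have h2 : "calisto".toList.take t =
      "calisto".toList.take (t - 1) ++ ["calisto".toList.getD (t - 1) ' '] := by
    interval_cases t <;> decide
  unfold pvM
  rw [h1, h2, List.drop_append_of_le_length (by simp; omega),
      show i + 1 - t = i - (t - 1) from by omega, pvApp1]

theorem pvM_nest (clave : List Char) (i s t : Nat) (hsi : s ≤ i) (hts : t ≤ s)
    (h1 : pvM clave s i) :
    (pvM clave t i ↔ ("calisto".toList.take s).drop (s - t) = "calisto".toList.take t) := by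
  unfold pvM at *
  rw [show i - t = (i - s) + (s - t) from by omega, ← List.drop_drop, h1]

theorem pvM7_iff (clave : List Char) (j : Nat) (_hj : j + 7 ≤ clave.length) :
    ("calisto".toList <+: (PySem.Chars.lower clave).drop j ↔ pvM clave 7 (j + 7)) := by
  unfold pvM
  rw [List.prefix_iff_eq_take]
  have h1 : ((PySem.Chars.lower clave).take (j + 7)).drop (j + 7 - 7) =
      ((PySem.Chars.lower clave).drop j).take 7 := by
    rw [show j + 7 - 7 = j from by omega, List.drop_take]
    congr 1; omega
  rw [h1]
  constructor
  · intro he; simpa using he.symm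
  · intro he; simpa using he.symm

-- no prefix of "calisto" has a nonempty proper border; checked by computation
theorem pvNoBorderFull : ∀ t : Nat, t < 7 → 1 ≤ t →
    ¬ ("calisto".toList.drop (7 - t) = "calisto".toList.take t) := by decide

theorem pvNoBorder : ∀ s : Nat, s < 7 → ∀ t : Nat, t < s → 1 ≤ t →
    ¬ (("calisto".toList.take s).drop (s - t) = "calisto".toList.take t) := by decide

theorem pvPatC : "calisto".toList.getD 0 ' ' = 'c' := by decide

theorem pvPatNotC : ∀ u : Nat, u < 6 → 1 ≤ u → "calisto".toList.getD u ' ' ≠ 'c' := by decide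

theorem pvTake7 : "calisto".toList.take 7 = "calisto".toList := by decide

-- the rolling-window update B performs is the uppercase count of the next window
theorem pvWin_succ (clave : List Char) (i : Nat) (h : i < clave.length) :
    pvCnt ((clave.take (i + 1)).drop (i + 1 - min (i + 1) 7)) =
      (if 7 ≤ i then
        pvCnt ((clave.take i).drop (i - min i 7))
          + (if PySem.Chars.isupper clave[i] then 1 else 0)
          - (if PySem.Chars.isupper (clave.getD (i - 7) ' ') then 1 else 0)
      else pvCnt ((clave.take i).drop (i - min i 7))
          + (if PySem.Chars.isupper clave[i] then 1 else 0)) := by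
  have htake : clave.take (i + 1) = clave.take i ++ [clave[i]] := by
    rw [List.take_add_one, List.getElem?_eq_getElem h]; rfl
  by_cases h7 : 7 ≤ i
  · rw [if_pos h7]
    have hmin1 : min (i + 1) 7 = 7 := by omega
    have hmin2 : min i 7 = 7 := by omega
    rw [hmin1, hmin2, htake,
        List.drop_append_of_le_length (by simp; omega), pvCnt_append]
    have hlt : i - 7 < (clave.take i).length := by simp; omega
    have hcons : (clave.take i).drop (i - 7) =
        (clave.take i)[i - 7]'hlt :: (clave.take i).drop (i - 7 + 1) := by
      exact List.drop_eq_getElem_cons hlt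
    have hgetD : clave.getD (i - 7) ' ' = (clave.take i)[i - 7]'hlt := by
      rw [List.getElem_take]
      exact List.getD_eq_getElem clave ' ' (by omega)
    rw [show i + 1 - 7 = i - 7 + 1 from by omega, hcons, pvCnt_cons, hgetD]
    ring
  · rw [if_neg h7]
    have hmin1 : min (i + 1) 7 = i + 1 := by omega
    have hmin2 : min i 7 = i := by omega
    rw [hmin1, hmin2, htake, show i + 1 - (i + 1) = 0 from by omega,
        show i - i = 0 from by omega, List.drop_zero, List.drop_zero, pvCnt_append]

-- window count at the end of a full match IS A's pvUps of that window
theorem pvUps_window (clave : List Char) (j : Nat) :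
    pvCnt ((clave.take (j + 7)).drop (j + 7 - min (j + 7) 7)) = pvUps clave j := by
  have hmin : min (j + 7) 7 = 7 := by omega
  have hs : PySem.List.slice clave (some (j : Int)) (some ((j : Int) + 7)) =
      (clave.drop j).take 7 := by
    have := PySem.List.slice_natCast_add clave j 7
    simpa using this
  rw [hmin, show j + 7 - 7 = j from by omega]
  unfold pvUps pvCnt
  rw [hs, List.drop_take]
  congr 2
  omega

theorem loopB_iff (clave : List Char) :
    ∀ (k i s : Nat) (ups : Int), clave.length ≤ i + k → pvInv clave i s ups →
      (contieneCalistoLoopB clave i s ups = true ↔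
        ∃ j, i ≤ j + 6 ∧ "calisto".toList <+: (PySem.Chars.lower clave).drop j ∧
          2 ≤ pvUps clave j ∧ pvUps clave j < 7) := by
  intro k
  induction k with
  | zero =>
    intro i s ups hk _
    rw [contieneCalistoLoopB, dif_neg (by omega)]
    constructor
    · intro hfalse; exact absurd hfalse (by simp)
    · rintro ⟨j, hij, hpre, _⟩
      have := pvPrefix_len _ j hpre
      rw [pvLower_length] at this
      omega
  | succ k ih =>
    intro i s ups hk inv
    obtain ⟨hs6, hsi, hin, hM, hMax, hU⟩ := inv
    by_cases h : i < clave.length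
    · rw [contieneCalistoLoopB, dif_pos h]
      simp only []
      set c := PySem.Chars.lowerChar clave[i] with hc
      set ups2 := if 7 ≤ i then
          ups + (if PySem.Chars.isupper clave[i] then 1 else 0)
              - (if PySem.Chars.isupper (clave.getD (i - 7) ' ') then 1 else 0)
        else ups + (if PySem.Chars.isupper clave[i] then 1 else 0) with hups2
      have hU2 : ups2 = pvCnt ((clave.take (i + 1)).drop (i + 1 - min (i + 1) 7)) := by
        rw [hups2, hU, pvWin_succ clave i h]
      -- the boundary window: a full match ends exactly at index i iff state goes to 7
      have hFull : ∀ hq : pvM clave 7 (i + 1),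
          6 ≤ i ∧ s = 6 ∧ c = "calisto".toList.getD 6 ' ' := by
        intro hq
        have h6i : 6 ≤ i := by
          by_contra hlt
          have := congrArg List.length hq
          simp [pvM] at hq
          have h1 := congrArg List.length hq
          rw [List.length_drop, List.length_take, pvLower_length] at h1
          simp at h1
          omega
        obtain ⟨hM6, hcp⟩ := (pvM_succ clave 7 i (by omega) (by omega) (by omega) h).mp hq
        have hs : s = 6 := by
          by_contra hne
          exact hMax 6 (by omega) (by omega) (by omega) hM6
        exact ⟨h6i, hs, hcp⟩
      by_cases hmatch : c = "calisto".toList.getD s ' '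
      · -- extend the match
        by_cases hs6' : s = 6
        · -- completed a full match ending at i
          subst hs6'
          have hM7 : pvM clave 7 (i + 1) :=
            (pvM_succ clave 7 i (by omega) (by omega) (by omega) h).mpr ⟨by simpa using hM, by simpa using hmatch⟩
          have hj7 : i - 6 + 7 = i + 1 := by omega
          have hmatchj : "calisto".toList <+: (PySem.Chars.lower clave).drop (i - 6) := by
            rw [pvM7_iff clave (i - 6) (by omega), hj7]; exact hM7
          have hupsj : ups2 = pvUps clave (i - 6) := by
            rw [hU2, ← hj7]
            exact pvUps_window clave (i - 6)
          rw [if_pos (by rw [if_pos hmatch])]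
          by_cases hq : 2 ≤ ups2 ∧ ups2 < 7
          · rw [if_pos hq]
            refine ⟨fun _ => ⟨i - 6, by omega, hmatchj, ?_, ?_⟩, fun _ => rfl⟩
            · rw [← hupsj]; exact hq.1
            · rw [← hupsj]; exact hq.2
          · rw [if_neg hq]
            have inv' : pvInv clave (i + 1) 0 ups2 := by
              refine ⟨by omega, by omega, by omega, pvM_zero clave (i + 1), ?_, hU2⟩
              intro t hpos ht6 hti hMt
              have := (pvM_nest clave (i + 1) 7 t (by omega) (by omega) hM7).mp hMt
              rw [pvTake7] at this
              exact pvNoBorderFull t (by omega) (by omega) this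
            rw [ih (i + 1) 0 ups2 (by omega) inv']
            constructor
            · rintro ⟨j, hij, hpre, hu⟩; exact ⟨j, by omega, hpre, hu⟩
            · rintro ⟨j, hij, hpre, hu⟩
              by_cases hj : i + 1 ≤ j + 6
              · exact ⟨j, hj, hpre, hu⟩
              · exfalso
                have hje : j = i - 6 := by
                  have := pvPrefix_len _ j hpre
                  rw [pvLower_length] at this
                  omega
                subst hje
                rw [← hupsj] at hu
                exact hq ⟨hu.1, hu.2⟩
        · -- partial extension: estado2 = s + 1 ≤ 6
          have hst : (if c = "calisto".toList.getD s ' ' then s + 1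
              else if c = 'c' then 1 else 0) = s + 1 := by rw [if_pos hmatch]
          rw [hst, if_neg (by omega)]
          have hMs1 : pvM clave (s + 1) (i + 1) :=
            (pvM_succ clave (s + 1) i (by omega) (by omega) (by omega) h).mpr
              ⟨by simpa using hM, by simpa using hmatch⟩
          have inv' : pvInv clave (i + 1) (s + 1) ups2 := by
            refine ⟨by omega, by omega, by omega, hMs1, ?_, hU2⟩
            intro t hst' ht6 hti hMt
            obtain ⟨hMt1, _⟩ :=
              (pvM_succ clave t i (by omega) (by omega) hti h).mp hMt
            exact hMax (t - 1) (by omega) (by omega) (by omega) hMt1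
          rw [ih (i + 1) (s + 1) ups2 (by omega) inv']
          constructor
          · rintro ⟨j, hij, hpre, hu⟩; exact ⟨j, by omega, hpre, hu⟩
          · rintro ⟨j, hij, hpre, hu⟩
            by_cases hj : i + 1 ≤ j + 6
            · exact ⟨j, hj, hpre, hu⟩
            · exfalso
              have hje : j = i - 6 ∧ 6 ≤ i := by
                have := pvPrefix_len _ j hpre
                rw [pvLower_length] at this
                omega
              have hM7 : pvM clave 7 (i + 1) := by
                have hm := (pvM7_iff clave j (by omega)).mp hpre
                rw [show j + 7 = i + 1 from by omega] at hm
                exact hm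
              obtain ⟨_, hs6'', _⟩ := hFull hM7
              exact hs6' hs6''
      · -- mismatch: estado2 = 1 (if c = 'c') or 0
        have hne7 : (if c = "calisto".toList.getD s ' ' then s + 1
            else if c = 'c' then 1 else 0) ≠ 7 := by
          rw [if_neg hmatch]; split_ifs <;> omega
        rw [if_neg hne7, if_neg hmatch]
        -- the new state in either sub-case
        have hstep : ∀ s2 : Nat, (s2 = 1 ∧ c = 'c') ∨ (s2 = 0 ∧ c ≠ 'c') →
            pvInv clave (i + 1) s2 ups2 := by
          rintro s2 (⟨rfl, hcC⟩ | ⟨rfl, hcC⟩)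
          · refine ⟨by omega, by omega, by omega, ?_, ?_, hU2⟩
            · exact (pvM_succ clave 1 i (by omega) (by omega) (by omega) h).mpr
                ⟨pvM_zero clave i, by rw [pvPatC]; exact hcC⟩
            · intro t ht1 ht6 hti hMt
              obtain ⟨_, hcp⟩ :=
                (pvM_succ clave t i (by omega) (by omega) hti h).mp hMt
              exact pvPatNotC (t - 1) (by omega) (by omega) (by rw [← hcp]; exact hcC)
          · refine ⟨by omega, by omega, by omega, pvM_zero clave (i + 1), ?_, hU2⟩
            intro t ht1 ht6 hti hMt
            obtain ⟨hMt1, hcp⟩ :=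
              (pvM_succ clave t i (by omega) (by omega) hti h).mp hMt
            by_cases ht1' : t = 1
            · subst ht1'
              rw [pvPatC] at hcp
              exact hcC hcp
            · -- t ≥ 2 : the shorter match must sit inside the current state s
              have hts : t - 1 ≤ s := by
                by_contra hgt
                exact hMax (t - 1) (by omega) (by omega) (by omega) hMt1
              rcases Nat.eq_or_lt_of_le hts with he | hl
              · exact hmatch (by rw [← he]; exact hcp)
              · have := (pvM_nest clave i s (t - 1) hsi (by omega) hM).mp hMt1
                exact pvNoBorder s (by omega) (t - 1) hl (by omega) this
        have hrec : ∀ s2 : Nat, (s2 = 1 ∧ c = 'c') ∨ (s2 = 0 ∧ c ≠ 'c') →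
            (contieneCalistoLoopB clave (i + 1) s2 ups2 = true ↔
              ∃ j, i ≤ j + 6 ∧ "calisto".toList <+: (PySem.Chars.lower clave).drop j ∧
                2 ≤ pvUps clave j ∧ pvUps clave j < 7) := by
          intro s2 hcase
          rw [ih (i + 1) s2 ups2 (by omega) (hstep s2 hcase)]
          constructor
          · rintro ⟨j, hij, hpre, hu⟩; exact ⟨j, by omega, hpre, hu⟩
          · rintro ⟨j, hij, hpre, hu⟩
            by_cases hj : i + 1 ≤ j + 6
            · exact ⟨j, hj, hpre, hu⟩
            · exfalso
              have hje : j = i - 6 ∧ 6 ≤ i := by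
                have := pvPrefix_len _ j hpre
                rw [pvLower_length] at this
                omega
              have hM7 : pvM clave 7 (i + 1) := by
                have := (pvM7_iff clave j (by omega)).mp hpre
                rw [show j + 7 = i + 1 from by omega] at this
                exact this
              obtain ⟨_, _, hcp⟩ := hFull hM7
              exact hmatch (by rw [hcp]; congr 1; omega)
        by_cases hcC : c = 'c'
        · rw [if_pos hcC]
          exact hrec 1 (Or.inl ⟨rfl, hcC⟩)
        · rw [if_neg hcC]
          exact hrec 0 (Or.inr ⟨rfl, hcC⟩)
    · rw [contieneCalistoLoopB, dif_neg h]
      constructor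
      · intro hfalse; exact absurd hfalse (by simp)
      · rintro ⟨j, hij, hpre, _⟩
        have := pvPrefix_len _ j hpre
        rw [pvLower_length] at this
        omega

-- ===== VERDICT (by name: the statement is the Claim_ definition above) =====
theorem contiene_calisto_spec : Claim_equal_contiene_calisto := by
  intro clave _
  unfold Spec_contiene_calisto contiene_calisto contiene_calisto_alt
  rw [Bool.eq_iff_iff]
  rw [loopA_iff clave.toList (PySem.Chars.lower clave.toList)
        (PySem.Chars.lower clave.toList).length 0 (by omega)]
  have inv0 : pvInv clave.toList 0 0 0 :=
    ⟨by omega, by omega, by omega, pvM_zero _ 0, by intro t h1 _ h3; omega, by simp [pvCnt]⟩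
  rw [loopB_iff clave.toList clave.toList.length 0 0 0 (by omega) inv0]
  constructor
  · rintro ⟨j, _, hpre, hu⟩; exact ⟨j, by omega, hpre, hu⟩
  · rintro ⟨j, _, hpre, hu⟩; exact ⟨j, by omega, hpre, hu⟩
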